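-- pv_equiv track=rewrite | github.com/velezy/yamil-browser | chat-service/assemblyline-common/assemblyline_common/phi/masking.py | _infer_phi_type
-- ===== SOURCE A (Python) =====
-- from enum import Enum
--
-- class PHIType(str, Enum):
--     """HIPAA Safe Harbor 18 identifier categories."""
--
--     NAME = "name"
--     GEOGRAPHIC = "geographic"
--     DATE = "date"
--     PHONE = "phone"
--     FAX = "fax"
--     EMAIL = "email"
--     SSN = "ssn"
--     MRN = "mrn"  # Medical Record Number
--     HEALTH_PLAN_ID = "health_plan_id"
--     ACCOUNT_NUMBER = "account_number"
--     LICENSE_NUMBER = "license_number"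
--     VEHICLE_ID = "vehicle_id"
--     DEVICE_ID = "device_id"
--     URL = "url"
--     IP_ADDRESS = "ip_address"
--     BIOMETRIC = "biometric"
--     PHOTO = "photo"
--     OTHER_ID = "other_id"
--
-- def _infer_phi_type(field_name: str) -> PHIType:
--     """Infer PHI type from field name."""
--     field_lower = field_name.lower()
--
--     if any(n in field_lower for n in ["name", "first", "last"]):
--         return PHIType.NAME
--     elif any(n in field_lower for n in ["ssn", "social"]):
--         return PHIType.SSN
--     elif any(n in field_lower for n in ["dob", "birth", "date"]):
--         return PHIType.DATE
--     elif any(n in field_lower for n in ["phone", "tel", "mobile"]):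
--         return PHIType.PHONE
--     elif any(n in field_lower for n in ["email"]):
--         return PHIType.EMAIL
--     elif any(n in field_lower for n in ["address", "street"]):
--         return PHIType.GEOGRAPHIC
--     elif any(n in field_lower for n in ["mrn", "medical_record", "patient_id"]):
--         return PHIType.MRN
--     elif any(n in field_lower for n in ["ip"]):
--         return PHIType.IP_ADDRESS
--     else:
--         return PHIType.OTHER_ID
-- ===== SOURCE B (Python) =====
-- from enum import Enum
--
-- class PHIType(str, Enum):
--     """HIPAA Safe Harbor 18 identifier categories."""
--
--     NAME = "name"
--     GEOGRAPHIC = "geographic"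
--     DATE = "date"
--     PHONE = "phone"
--     FAX = "fax"
--     EMAIL = "email"
--     SSN = "ssn"
--     MRN = "mrn"
--     HEALTH_PLAN_ID = "health_plan_id"
--     ACCOUNT_NUMBER = "account_number"
--     LICENSE_NUMBER = "license_number"
--     VEHICLE_ID = "vehicle_id"
--     DEVICE_ID = "device_id"
--     URL = "url"
--     IP_ADDRESS = "ip_address"
--     BIOMETRIC = "biometric"
--     PHOTO = "photo"
--     OTHER_ID = "other_id"
--
-- # Keyword -> (priority, PHIType); lower priority wins (the order of A's checks).
-- _KEYWORD_MAP = {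
--     "name": (0, PHIType.NAME), "first": (0, PHIType.NAME), "last": (0, PHIType.NAME),
--     "ssn": (1, PHIType.SSN), "social": (1, PHIType.SSN),
--     "dob": (2, PHIType.DATE), "birth": (2, PHIType.DATE), "date": (2, PHIType.DATE),
--     "phone": (3, PHIType.PHONE), "tel": (3, PHIType.PHONE), "mobile": (3, PHIType.PHONE),
--     "email": (4, PHIType.EMAIL),
--     "address": (5, PHIType.GEOGRAPHIC), "street": (5, PHIType.GEOGRAPHIC),
--     "mrn": (6, PHIType.MRN), "medical_record": (6, PHIType.MRN), "patient_id": (6, PHIType.MRN),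
--     "ip": (7, PHIType.IP_ADDRESS),
-- }
--
-- # The distinct keyword lengths: only windows of these sizes can be keywords.
-- _LENGTHS = (2, 3, 4, 5, 6, 7, 10, 14)
--
-- def _infer_phi_type(field_name: str) -> PHIType:
--     """Infer PHI type from field name.
--
--     Sliding-window scan: hash every window of a keyword length into the
--     keyword map and keep the hit of smallest priority.
--     """
--     field_lower = field_name.lower()
--     best = None
--     for i in range(len(field_lower)):
--         for length in _LENGTHS:
--             hit = _KEYWORD_MAP.get(field_lower[i:i + length])
--             if hit is not None and (best is None or hit[0] < best[0]):
--                 best = hit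
--     return best[1] if best is not None else PHIType.OTHER_ID
-- ===== Notes on version B (the rewrite author's own statement) =====
-- stated objective: alternative
-- what changed: Instead of testing each of the 19 keywords for substring containment in priority order, B slides a window over the lowercased field name, hashes every window of a keyword length into a keyword->(priority,type) dict, and returns the type of the smallest-priority hit (default OTHER_ID).
import Mathlib
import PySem

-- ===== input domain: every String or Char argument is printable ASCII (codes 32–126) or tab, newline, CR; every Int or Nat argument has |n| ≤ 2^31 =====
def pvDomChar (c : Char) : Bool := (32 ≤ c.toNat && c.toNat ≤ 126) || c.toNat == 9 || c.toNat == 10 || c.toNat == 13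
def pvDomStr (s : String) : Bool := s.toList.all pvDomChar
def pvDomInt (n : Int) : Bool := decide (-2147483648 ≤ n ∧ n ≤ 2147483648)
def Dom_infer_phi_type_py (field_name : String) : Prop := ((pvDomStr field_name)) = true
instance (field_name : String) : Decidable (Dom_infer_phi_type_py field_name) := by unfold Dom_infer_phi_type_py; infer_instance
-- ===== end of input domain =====

-- B replaces A's per-keyword cascade by a sliding-window scan: every window of a keyword length is hashed
-- into a keyword->(priority,type) map and the smallest-priority hit wins (alternative algorithm, same cost).


-- ===== PORT A =====
-- literal port of A's if/elif cascade
def infer_phi_type_py (field_name : String) : String :=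
  let field_lower := PySem.Str.lower field_name
  if ["name", "first", "last"].any (fun n => PySem.Str.isIn n field_lower) then "name"
  else if ["ssn", "social"].any (fun n => PySem.Str.isIn n field_lower) then "ssn"
  else if ["dob", "birth", "date"].any (fun n => PySem.Str.isIn n field_lower) then "date"
  else if ["phone", "tel", "mobile"].any (fun n => PySem.Str.isIn n field_lower) then "phone"
  else if ["email"].any (fun n => PySem.Str.isIn n field_lower) then "email"
  else if ["address", "street"].any (fun n => PySem.Str.isIn n field_lower) then "geographic"
  else if ["mrn", "medical_record", "patient_id"].any (fun n => PySem.Str.isIn n field_lower) then "mrn"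
  else if ["ip"].any (fun n => PySem.Str.isIn n field_lower) then "ip_address"
  else "other_id"

-- ===== PORT B =====
-- B: _KEYWORD_MAP, keyword -> (priority, type); strings ported on the code-point lists (exact)
def pvKwList : List (List Char × (Nat × String)) :=
  [ ("name".toList, (0, "name")), ("first".toList, (0, "name")), ("last".toList, (0, "name"))
  , ("ssn".toList, (1, "ssn")), ("social".toList, (1, "ssn"))
  , ("dob".toList, (2, "date")), ("birth".toList, (2, "date")), ("date".toList, (2, "date"))
  , ("phone".toList, (3, "phone")), ("tel".toList, (3, "phone")), ("mobile".toList, (3, "phone"))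
  , ("email".toList, (4, "email"))
  , ("address".toList, (5, "geographic")), ("street".toList, (5, "geographic"))
  , ("mrn".toList, (6, "mrn")), ("medical_record".toList, (6, "mrn")), ("patient_id".toList, (6, "mrn"))
  , ("ip".toList, (7, "ip_address")) ]

def pvKwMap : PySem.Dict (List Char) (Nat × String) := PySem.Dict.mk pvKwList

-- _LENGTHS: the distinct keyword lengths
def pvLens : List Nat := [2, 3, 4, 5, 6, 7, 10, 14]

-- the body of the inner if: keep the hit of smaller priority
def pvUpd (best : Option (Nat × String)) (hit? : Option (Nat × String)) : Option (Nat × String) :=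
  match hit? with
  | none => best
  | some hit =>
    match best with
    | none => some hit
    | some b => if hit.1 < b.1 then some hit else best

-- the double loop over i in range(len(f)) and length in _LENGTHS; f[i:i+length] = (f.drop i).take length
def pvScan (f : List Char) : Option (Nat × String) :=
  (List.range f.length).foldl
    (fun best i => pvLens.foldl (fun b L => pvUpd b (pvKwMap.get? ((f.drop i).take L))) best)
    none

def infer_phi_type_py_alt (field_name : String) : String :=
  match pvScan (PySem.Str.lower field_name).toList with
  | some best => best.2
  | none => "other_id"

-- ===== PRECONDITION & SPEC =====
def Spec_infer_phi_type_py (field_name : String) (out : String) : Prop := out = infer_phi_type_py_alt field_name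
instance (field_name : String) (out : String) : Decidable (Spec_infer_phi_type_py field_name out) := by unfold Spec_infer_phi_type_py; infer_instance

-- ===== CLAIM (what is proved, stated in full; the proofs are below) =====
def Claim_equal_infer_phi_type_py : Prop := ∀ (field_name : String), Dom_infer_phi_type_py field_name → Spec_infer_phi_type_py field_name (infer_phi_type_py field_name)

-- ===== LEMMAS AND PROOFS =====

-- priority of an optional hit (8 = no hit)
def pvPrio : Option (Nat × String) → Nat
  | none => 8
  | some b => b.1

-- type of each priority
def pvGrpOf : Nat → String := fun p =>
  ["name", "ssn", "date", "phone", "email", "geographic", "mrn", "ip_address"].getD p "other_id"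

-- well-formed optional hits: none, or a (priority, type) pair from the table
def pvWf (o : Option (Nat × String)) : Prop := o = none ∨ ∃ p, p < 8 ∧ o = some (p, pvGrpOf p)

-- the flattened list of lookups B performs
def pvHits (f : List Char) : List (Option (Nat × String)) :=
  (List.range f.length).flatMap (fun i => pvLens.map (fun L => pvKwMap.get? ((f.drop i).take L)))

-- some window of a keyword length equals a priority-p keyword
def pvHitAt (f : List Char) (p : Nat) : Prop :=
  ∃ i, i < f.length ∧ ∃ L ∈ pvLens, pvKwMap.get? ((f.drop i).take L) = some (p, pvGrpOf p)

-- some priority-p keyword is a substring of f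
def pvMatched (f : List Char) (p : Nat) : Prop :=
  ∃ e ∈ pvKwList, e.2.1 = p ∧ PySem.Chars.isIn e.1 f = true

lemma pv_scan_flat (f : List Char) : pvScan f = (pvHits f).foldl pvUpd none := by
  unfold pvScan pvHits
  rw [List.foldl_flatMap]
  simp [List.foldl_map]

lemma pv_get_mem {s : List Char} {v : Nat × String} (h : pvKwMap.get? s = some v) :
    (s, v) ∈ pvKwList :=
  PySem.Dict.mem_items_of_get?_eq_some _ h

lemma pv_key_facts : ∀ e ∈ pvKwList,
    e.1 ≠ [] ∧ e.1.length ∈ pvLens ∧ pvKwMap.get? e.1 = some e.2 ∧ e.2.1 < 8 ∧ e.2.2 = pvGrpOf e.2.1 := by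
  decide

lemma pv_get_wf (s : List Char) : pvWf (pvKwMap.get? s) := by
  rcases hg : pvKwMap.get? s with _ | v
  · exact Or.inl rfl
  · obtain ⟨-, -, -, hlt, htype⟩ := pv_key_facts _ (pv_get_mem hg)
    cases v with
    | mk p t =>
      right
      refine ⟨p, hlt, ?_⟩
      simp only at htype
      rw [htype]

lemma pv_upd_or (b h : Option (Nat × String)) : pvUpd b h = b ∨ pvUpd b h = h := by
  cases h with
  | none => left; rfl
  | some hit =>
    cases b with
    | none => right; rfl
    | some bb =>
      by_cases hc : hit.1 < bb.1
      · right; simp [pvUpd, hc]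
      · left; simp [pvUpd, hc]

lemma pv_foldl_or (l : List (Option (Nat × String))) (b : Option (Nat × String)) :
    l.foldl pvUpd b = b ∨ l.foldl pvUpd b ∈ l := by
  induction l generalizing b with
  | nil => left; rfl
  | cons x xs ih =>
    simp only [List.foldl_cons]
    rcases ih (pvUpd b x) with h | h
    · rcases pv_upd_or b x with h2 | h2
      · left; rw [h, h2]
      · right; rw [h, h2]; exact List.mem_cons_self
    · right; exact List.mem_cons_of_mem _ h

lemma pv_prio_le_eight {o : Option (Nat × String)} (h : pvWf o) : pvPrio o ≤ 8 := by
  rcases h with h | ⟨p, hp, h⟩ <;> subst h <;> simp [pvPrio] <;> omega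

lemma pv_upd_prio_le_left {b h : Option (Nat × String)} (hh : pvWf h) :
    pvPrio (pvUpd b h) ≤ pvPrio b := by
  cases h with
  | none => exact le_refl _
  | some hit =>
    cases b with
    | none =>
      have := pv_prio_le_eight hh
      simpa [pvUpd, pvPrio] using this
    | some bb =>
      by_cases hc : hit.1 < bb.1 <;> simp [pvUpd, pvPrio, hc] <;> omega

lemma pv_upd_prio_le_right {b h : Option (Nat × String)} (hb : pvWf b) :
    pvPrio (pvUpd b h) ≤ pvPrio h := by
  cases h with
  | none =>
    have := pv_prio_le_eight hb
    simpa [pvUpd, pvPrio] using this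
  | some hit =>
    cases b with
    | none => simp [pvUpd, pvPrio]
    | some bb =>
      by_cases hc : hit.1 < bb.1 <;> simp [pvUpd, pvPrio, hc] <;> omega

lemma pv_upd_wf {b h : Option (Nat × String)} (hb : pvWf b) (hh : pvWf h) : pvWf (pvUpd b h) := by
  rcases pv_upd_or b h with h2 | h2 <;> rw [h2] <;> assumption

lemma pv_foldl_wf (l : List (Option (Nat × String))) (b : Option (Nat × String))
    (hb : pvWf b) (hl : ∀ x ∈ l, pvWf x) : pvWf (l.foldl pvUpd b) := by
  induction l generalizing b with
  | nil => exact hb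
  | cons x xs ih =>
    exact ih (pvUpd b x) (pv_upd_wf hb (hl x List.mem_cons_self))
      (fun y hy => hl y (List.mem_cons_of_mem _ hy))

lemma pv_foldl_prio_le (l : List (Option (Nat × String))) (b : Option (Nat × String))
    (hb : pvWf b) (hl : ∀ x ∈ l, pvWf x) :
    pvPrio (l.foldl pvUpd b) ≤ pvPrio b ∧ ∀ x ∈ l, pvPrio (l.foldl pvUpd b) ≤ pvPrio x := by
  induction l generalizing b with
  | nil => exact ⟨le_refl _, by simp⟩
  | cons x xs ih =>
    have hxwf : pvWf x := hl x List.mem_cons_self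
    have hrest : ∀ y ∈ xs, pvWf y := fun y hy => hl y (List.mem_cons_of_mem _ hy)
    obtain ⟨h1, h2⟩ := ih (pvUpd b x) (pv_upd_wf hb hxwf) hrest
    refine ⟨le_trans h1 (pv_upd_prio_le_left hxwf), ?_⟩
    intro y hy
    rcases List.mem_cons.mp hy with rfl | hy
    · exact le_trans h1 (pv_upd_prio_le_right hb)
    · exact h2 y hy

lemma pv_mem_hits_iff {f : List Char} {x : Option (Nat × String)} :
    x ∈ pvHits f ↔ ∃ i, i < f.length ∧ ∃ L ∈ pvLens, x = pvKwMap.get? ((f.drop i).take L) := by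
  unfold pvHits
  simp [List.mem_flatMap, List.mem_map, List.mem_range, eq_comm]

lemma pv_scan_eq_some {f : List Char} {p : Nat} (hp : p < 8) (hhit : pvHitAt f p)
    (hno : ∀ q, q < p → ¬ pvHitAt f q) : pvScan f = some (p, pvGrpOf p) := by
  rw [pv_scan_flat]
  have hlwf : ∀ x ∈ pvHits f, pvWf x := by
    intro x hx
    rcases pv_mem_hits_iff.mp hx with ⟨i, _, L, _, rfl⟩
    exact pv_get_wf _
  obtain ⟨i, hi, L, hL, hget⟩ := hhit
  have hmem : some (p, pvGrpOf p) ∈ pvHits f :=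
    pv_mem_hits_iff.mpr ⟨i, hi, L, hL, hget.symm⟩
  have hwfnone : pvWf (none : Option (Nat × String)) := Or.inl rfl
  obtain ⟨_, hle⟩ := pv_foldl_prio_le (pvHits f) none hwfnone hlwf
  have hlep : pvPrio ((pvHits f).foldl pvUpd none) ≤ p := hle _ hmem
  have hwf : pvWf ((pvHits f).foldl pvUpd none) := pv_foldl_wf _ _ hwfnone hlwf
  rcases pv_foldl_or (pvHits f) none with hres | hres
  · rw [hres] at hlep; simp [pvPrio] at hlep; omega
  · rcases hwf with hnone | ⟨q, hq, heq⟩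
    · rw [hnone] at hlep; simp [pvPrio] at hlep; omega
    · rw [heq] at hres hlep ⊢
      simp only [pvPrio] at hlep
      have hhitq : pvHitAt f q := by
        rcases pv_mem_hits_iff.mp hres with ⟨i', hi', L', hL', hx⟩
        exact ⟨i', hi', L', hL', hx.symm⟩
      rcases Nat.lt_or_ge q p with hlt | hge
      · exact absurd hhitq (hno q hlt)
      · have : q = p := le_antisymm hlep hge
        rw [this]

lemma pv_scan_eq_none {f : List Char} (hno : ∀ q, q < 8 → ¬ pvHitAt f q) : pvScan f = none := by
  rw [pv_scan_flat]
  have hlwf : ∀ x ∈ pvHits f, pvWf x := by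
    intro x hx
    rcases pv_mem_hits_iff.mp hx with ⟨i, _, L, _, rfl⟩
    exact pv_get_wf _
  have hwf : pvWf ((pvHits f).foldl pvUpd none) := pv_foldl_wf _ _ (Or.inl rfl) hlwf
  rcases pv_foldl_or (pvHits f) none with hres | hres
  · exact hres
  · rcases hwf with hnone | ⟨q, hq, heq⟩
    · exact hnone
    · exfalso
      rw [heq] at hres
      rcases pv_mem_hits_iff.mp hres with ⟨i', hi', L', hL', hx⟩
      exact hno q hq ⟨i', hi', L', hL', hx.symm⟩

lemma pv_hitAt_iff_matched (f : List Char) (p : Nat) :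
    pvHitAt f p ↔ pvMatched f p := by
  constructor
  · rintro ⟨i, hi, L, hL, hget⟩
    have hmem := pv_get_mem hget
    refine ⟨((f.drop i).take L, (p, pvGrpOf p)), hmem, rfl, ?_⟩
    rw [← PySem.Chars.exists_prefix_drop_iff_isIn]
    exact ⟨i, List.take_prefix _ _⟩
  · rintro ⟨e, hmem, hprio, hisin⟩
    obtain ⟨hne, hlen, hget, hlt, htype⟩ := pv_key_facts e hmem
    obtain ⟨j, hpre⟩ := (PySem.Chars.exists_prefix_drop_iff_isIn (sub := e.1) (s := f)).mpr hisin
    have hdropne : f.drop j ≠ [] := by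
      intro hnil
      rw [hnil] at hpre
      exact hne (List.prefix_nil.mp hpre)
    have hj : j < f.length := List.length_lt_of_drop_ne_nil hdropne
    have htake : (f.drop j).take e.1.length = e.1 := (List.prefix_iff_eq_take.mp hpre).symm
    refine ⟨j, hj, e.1.length, hlen, ?_⟩
    rw [htake, hget]
    have : e.2 = (p, pvGrpOf p) := by
      rcases e with ⟨k, q, t⟩
      simp only at hprio htype ⊢
      rw [hprio] at htype ⊢
      rw [htype]
    rw [this]

-- the boolean conditions of A's cascade, gathered per priority
lemma pv_cond_iff (p : Nat) (ks : List String) (s : String)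
    (hks : ∀ n ∈ ks, (n.toList, (p, pvGrpOf p)) ∈ pvKwList)
    (hback : ∀ e ∈ pvKwList, e.2.1 = p → e.1 ∈ ks.map String.toList) :
    (ks.any fun n => PySem.Str.isIn n s) = true ↔ pvMatched s.toList p := by
  rw [List.any_eq_true]
  constructor
  · rintro ⟨n, hn, hin⟩
    refine ⟨(n.toList, (p, pvGrpOf p)), hks n hn, rfl, ?_⟩
    simpa [PySem.Str.isIn] using hin
  · rintro ⟨e, hmem, hprio, hisin⟩
    obtain ⟨n, hn, hnl⟩ := List.mem_map.mp (hback e hmem hprio)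
    refine ⟨n, hn, ?_⟩
    simp only [PySem.Str.isIn, hnl]
    exact hisin

theorem pv_main (field_name : String) :
    infer_phi_type_py field_name = infer_phi_type_py_alt field_name := by
  unfold infer_phi_type_py infer_phi_type_py_alt
  set s := PySem.Str.lower field_name with hs
  have h0 := pv_cond_iff 0 ["name", "first", "last"] s (by decide) (by decide)
  have h1 := pv_cond_iff 1 ["ssn", "social"] s (by decide) (by decide)
  have h2 := pv_cond_iff 2 ["dob", "birth", "date"] s (by decide) (by decide)
  have h3 := pv_cond_iff 3 ["phone", "tel", "mobile"] s (by decide) (by decide)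
  have h4 := pv_cond_iff 4 ["email"] s (by decide) (by decide)
  have h5 := pv_cond_iff 5 ["address", "street"] s (by decide) (by decide)
  have h6 := pv_cond_iff 6 ["mrn", "medical_record", "patient_id"] s (by decide) (by decide)
  have h7 := pv_cond_iff 7 ["ip"] s (by decide) (by decide)
  by_cases c0 : (["name", "first", "last"].any fun n => PySem.Str.isIn n s) = true
  · have hscan : pvScan s.toList = some (0, pvGrpOf 0) :=
      pv_scan_eq_some (by omega) ((pv_hitAt_iff_matched _ 0).mpr (h0.mp c0))
        (fun q hq => absurd hq (by omega))
    rw [if_pos c0, hscan]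
    rfl
  have hn0 : ¬ pvHitAt s.toList 0 :=
    fun hh => c0 (h0.mpr ((pv_hitAt_iff_matched _ 0).mp hh))
  by_cases c1 : (["ssn", "social"].any fun n => PySem.Str.isIn n s) = true
  · have hscan : pvScan s.toList = some (1, pvGrpOf 1) :=
      pv_scan_eq_some (by omega) ((pv_hitAt_iff_matched _ 1).mpr (h1.mp c1))
        (fun q hq => by interval_cases q <;> assumption)
    rw [if_neg c0, if_pos c1, hscan]
    rfl
  have hn1 : ¬ pvHitAt s.toList 1 :=
    fun hh => c1 (h1.mpr ((pv_hitAt_iff_matched _ 1).mp hh))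
  by_cases c2 : (["dob", "birth", "date"].any fun n => PySem.Str.isIn n s) = true
  · have hscan : pvScan s.toList = some (2, pvGrpOf 2) :=
      pv_scan_eq_some (by omega) ((pv_hitAt_iff_matched _ 2).mpr (h2.mp c2))
        (fun q hq => by interval_cases q <;> assumption)
    rw [if_neg c0, if_neg c1, if_pos c2, hscan]
    rfl
  have hn2 : ¬ pvHitAt s.toList 2 :=
    fun hh => c2 (h2.mpr ((pv_hitAt_iff_matched _ 2).mp hh))
  by_cases c3 : (["phone", "tel", "mobile"].any fun n => PySem.Str.isIn n s) = true
  · have hscan : pvScan s.toList = some (3, pvGrpOf 3) :=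
      pv_scan_eq_some (by omega) ((pv_hitAt_iff_matched _ 3).mpr (h3.mp c3))
        (fun q hq => by interval_cases q <;> assumption)
    rw [if_neg c0, if_neg c1, if_neg c2, if_pos c3, hscan]
    rfl
  have hn3 : ¬ pvHitAt s.toList 3 :=
    fun hh => c3 (h3.mpr ((pv_hitAt_iff_matched _ 3).mp hh))
  by_cases c4 : (["email"].any fun n => PySem.Str.isIn n s) = true
  · have hscan : pvScan s.toList = some (4, pvGrpOf 4) :=
      pv_scan_eq_some (by omega) ((pv_hitAt_iff_matched _ 4).mpr (h4.mp c4))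
        (fun q hq => by interval_cases q <;> assumption)
    rw [if_neg c0, if_neg c1, if_neg c2, if_neg c3, if_pos c4, hscan]
    rfl
  have hn4 : ¬ pvHitAt s.toList 4 :=
    fun hh => c4 (h4.mpr ((pv_hitAt_iff_matched _ 4).mp hh))
  by_cases c5 : (["address", "street"].any fun n => PySem.Str.isIn n s) = true
  · have hscan : pvScan s.toList = some (5, pvGrpOf 5) :=
      pv_scan_eq_some (by omega) ((pv_hitAt_iff_matched _ 5).mpr (h5.mp c5))
        (fun q hq => by interval_cases q <;> assumption)
    rw [if_neg c0, if_neg c1, if_neg c2, if_neg c3, if_neg c4, if_pos c5, hscan]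
    rfl
  have hn5 : ¬ pvHitAt s.toList 5 :=
    fun hh => c5 (h5.mpr ((pv_hitAt_iff_matched _ 5).mp hh))
  by_cases c6 : (["mrn", "medical_record", "patient_id"].any fun n => PySem.Str.isIn n s) = true
  · have hscan : pvScan s.toList = some (6, pvGrpOf 6) :=
      pv_scan_eq_some (by omega) ((pv_hitAt_iff_matched _ 6).mpr (h6.mp c6))
        (fun q hq => by interval_cases q <;> assumption)
    rw [if_neg c0, if_neg c1, if_neg c2, if_neg c3, if_neg c4, if_neg c5, if_pos c6, hscan]
    rfl
  have hn6 : ¬ pvHitAt s.toList 6 :=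
    fun hh => c6 (h6.mpr ((pv_hitAt_iff_matched _ 6).mp hh))
  by_cases c7 : (["ip"].any fun n => PySem.Str.isIn n s) = true
  · have hscan : pvScan s.toList = some (7, pvGrpOf 7) :=
      pv_scan_eq_some (by omega) ((pv_hitAt_iff_matched _ 7).mpr (h7.mp c7))
        (fun q hq => by interval_cases q <;> assumption)
    rw [if_neg c0, if_neg c1, if_neg c2, if_neg c3, if_neg c4, if_neg c5, if_neg c6, if_pos c7, hscan]
    rfl
  have hn7 : ¬ pvHitAt s.toList 7 :=
    fun hh => c7 (h7.mpr ((pv_hitAt_iff_matched _ 7).mp hh))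
  have hscan : pvScan s.toList = none :=
    pv_scan_eq_none (fun q hq => by interval_cases q <;> assumption)
  rw [if_neg c0, if_neg c1, if_neg c2, if_neg c3, if_neg c4, if_neg c5, if_neg c6, if_neg c7, hscan]

-- ===== VERDICT (by name: the statement is the Claim_ definition above) =====
theorem infer_phi_type_py_spec : Claim_equal_infer_phi_type_py := by
  intro field_name _
  unfold Spec_infer_phi_type_py
  exact pv_main field_name
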